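-- pv_equiv track=rewrite | github.com/Relativity74205/murkelhausen_app_v2 | .github/actions/semver/semver_tagging.py | get_upgrade_type
-- ===== SOURCE A (Python) =====
-- from enum import StrEnum, auto
--
-- class UpgradeType(StrEnum):
--     MAJOR = auto()
--     MINOR = auto()
--     PATCH = auto()
--     NONE = auto()
--
-- def get_conventional_commits_prefix(commit_message: str) -> str | None:
--     try:
--         return commit_message.split(":")[0].strip()
--     except IndexError:
--         return None
--
-- def is_breaking_change(commit_message: str) -> bool:
--     return "BREAKING" in commit_message
--
-- def get_upgrade_type(commit_messages: list[str]) -> UpgradeType: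
--     for commit_message in commit_messages:
--         if is_breaking_change(commit_message):
--             return UpgradeType.MAJOR
--
--     for commit_message in commit_messages:
--         if get_conventional_commits_prefix(commit_message) == "feat":
--             return UpgradeType.MINOR
--
--     for commit_message in commit_messages:
--         if get_conventional_commits_prefix(commit_message) == "fix":
--             return UpgradeType.PATCH
--
--     return UpgradeType.NONE
-- ===== SOURCE B (Python) =====
-- from enum import StrEnum, auto
--
-- class UpgradeType(StrEnum):
--     MAJOR = auto()
--     MINOR = auto()
--     PATCH = auto()
--     NONE = auto()
--
-- def get_upgrade_type(commit_messages: list[str]) -> UpgradeType: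
--     has_major = has_minor = has_patch = False
--     for commit_message in commit_messages:
--         if "BREAKING" in commit_message:
--             has_major = True
--         prefix = commit_message.split(":")[0].strip()
--         if prefix == "feat":
--             has_minor = True
--         if prefix == "fix":
--             has_patch = True
--     if has_major:
--         return UpgradeType.MAJOR
--     if has_minor:
--         return UpgradeType.MINOR
--     if has_patch:
--         return UpgradeType.PATCH
--     return UpgradeType.NONE
-- ===== Notes on version B (the rewrite author's own statement) =====
-- stated objective: simpler
-- what changed: Replaces A's three sequential early-return scans over the list with a single pass that records has_major/has_minor/has_patch booleans and resolves the MAJOR>MINOR>PATCH priority once at the end.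
import Mathlib
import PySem

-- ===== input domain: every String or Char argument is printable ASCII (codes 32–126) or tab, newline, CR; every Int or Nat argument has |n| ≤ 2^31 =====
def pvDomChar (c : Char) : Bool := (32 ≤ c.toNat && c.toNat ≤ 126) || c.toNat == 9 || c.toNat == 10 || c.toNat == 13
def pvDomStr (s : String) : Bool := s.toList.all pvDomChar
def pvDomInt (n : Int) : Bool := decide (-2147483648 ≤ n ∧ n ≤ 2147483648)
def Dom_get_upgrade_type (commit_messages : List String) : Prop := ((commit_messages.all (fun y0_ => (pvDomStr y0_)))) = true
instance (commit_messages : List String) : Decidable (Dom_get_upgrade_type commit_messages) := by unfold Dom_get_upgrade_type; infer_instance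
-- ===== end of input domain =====

-- B replaces A's three sequential early-return scans by one pass collecting three booleans,
-- resolving the major>minor>patch priority after the loop (objective: simpler, same cost).

-- ===== PORT A =====
-- helper: get_conventional_commits_prefix (the try/except IndexError becomes the none branch)
def pvPrefixA (commit_message : String) : Option String :=
  match PySem.Str.split? commit_message ":" with
  | some parts =>
    match PySem.List.pyGet? parts 0 with
    | some s => some (PySem.Str.strip s)
    | none => none          -- IndexError branch: return None
  | none => none            -- unreachable: separator ":" is nonempty

-- helper: is_breaking_change
def pvIsBreaking (commit_message : String) : Bool := PySem.Str.isIn "BREAKING" commit_message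

-- first loop: return MAJOR on the first breaking message
def pvLoopMajor : List String → Option String
  | [] => none
  | m :: rest => if pvIsBreaking m then some "major" else pvLoopMajor rest

-- second loop: return MINOR on the first 'feat' prefix
def pvLoopMinor : List String → Option String
  | [] => none
  | m :: rest => if pvPrefixA m == some "feat" then some "minor" else pvLoopMinor rest

-- third loop: return PATCH on the first 'fix' prefix
def pvLoopPatch : List String → Option String
  | [] => none
  | m :: rest => if pvPrefixA m == some "fix" then some "patch" else pvLoopPatch rest

def get_upgrade_type (commit_messages : List String) : String :=
  match pvLoopMajor commit_messages with
  | some r => r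
  | none =>
    match pvLoopMinor commit_messages with
    | some r => r
    | none =>
      match pvLoopPatch commit_messages with
      | some r => r
      | none => "none"

-- ===== PORT B =====
-- B's prefix: commit_message.split(":")[0].strip() as a plain string
def pvPrefixB (commit_message : String) : String :=
  match PySem.Str.split? commit_message ":" with
  | some parts =>
    match PySem.List.pyGet? parts 0 with
    | some s => PySem.Str.strip s
    | none => ""            -- unreachable: split(":") is never empty
  | none => ""              -- unreachable: separator ":" is nonempty

-- one loop iteration: update the three booleans
def pvStepB (st : Bool × Bool × Bool) (m : String) : Bool × Bool × Bool :=
  let hasMajor := if PySem.Str.isIn "BREAKING" m then true else st.1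
  let p := pvPrefixB m
  let hasMinor := if p == "feat" then true else st.2.1
  let hasPatch := if p == "fix" then true else st.2.2
  (hasMajor, hasMinor, hasPatch)

def get_upgrade_type_alt (commit_messages : List String) : String :=
  let st := commit_messages.foldl pvStepB (false, false, false)
  if st.1 then "major"
  else if st.2.1 then "minor"
  else if st.2.2 then "patch"
  else "none"

-- ===== PRECONDITION & SPEC =====
def Spec_get_upgrade_type (commit_messages : List String) (out : String) : Prop := out = get_upgrade_type_alt commit_messages
instance (commit_messages : List String) (out : String) : Decidable (Spec_get_upgrade_type commit_messages out) := by unfold Spec_get_upgrade_type; infer_instance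

-- ===== CLAIM (what is proved, stated in full; the proofs are below) =====
def Claim_equal_get_upgrade_type : Prop := ∀ (commit_messages : List String), Dom_get_upgrade_type commit_messages → Spec_get_upgrade_type commit_messages (get_upgrade_type commit_messages)

-- ===== LEMMAS AND PROOFS =====

-- per-message agreement of the two prefix tests
lemma prefix_agree (m t : String) (ht : (("" == t) = false)) :
    (pvPrefixA m == some t) = (pvPrefixB m == t) := by
  unfold pvPrefixA pvPrefixB
  cases PySem.Str.split? m ":" with
  | none => simp [ht]
  | some parts =>
    cases h : PySem.List.pyGet? parts 0 with
    | none => simp [h, ht]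
    | some s => simp [h]

-- each of A's loops decides an 'any'
lemma loopMajor_eq (l : List String) :
    pvLoopMajor l = if l.any pvIsBreaking then some "major" else none := by
  induction l with
  | nil => simp [pvLoopMajor]
  | cons m rest ih => by_cases h : pvIsBreaking m <;> simp [pvLoopMajor, h, ih]

lemma loopMinor_eq (l : List String) :
    pvLoopMinor l = if l.any (fun m => pvPrefixA m == some "feat") then some "minor" else none := by
  induction l with
  | nil => simp [pvLoopMinor]
  | cons m rest ih => by_cases h : pvPrefixA m == some "feat" <;> simp [pvLoopMinor, h, ih]

lemma loopPatch_eq (l : List String) :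
    pvLoopPatch l = if l.any (fun m => pvPrefixA m == some "fix") then some "patch" else none := by
  induction l with
  | nil => simp [pvLoopPatch]
  | cons m rest ih => by_cases h : pvPrefixA m == some "fix" <;> simp [pvLoopPatch, h, ih]

-- B's fold computes the three 'any's, or-ed onto the start state
lemma foldB_eq (l : List String) (a b c : Bool) :
    l.foldl pvStepB (a, b, c) =
      (a || l.any (fun m => PySem.Str.isIn "BREAKING" m),
       b || l.any (fun m => pvPrefixB m == "feat"),
       c || l.any (fun m => pvPrefixB m == "fix")) := by
  induction l generalizing a b c with
  | nil => simp
  | cons m rest ih =>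
    simp only [List.foldl_cons, List.any_cons, pvStepB, ih]
    cases PySem.Str.isIn "BREAKING" m <;>
    cases pvPrefixB m == "feat" <;>
    cases pvPrefixB m == "fix" <;> simp

-- ===== VERDICT (by name: the statement is the Claim_ definition above) =====
theorem get_upgrade_type_spec : Claim_equal_get_upgrade_type := by
  intro l _
  show get_upgrade_type l = get_upgrade_type_alt l
  unfold get_upgrade_type get_upgrade_type_alt
  rw [loopMajor_eq, loopMinor_eq, loopPatch_eq, foldB_eq]
  have h1 : (fun m => pvPrefixA m == some "feat") = (fun m => pvPrefixB m == "feat") := by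
    funext m; exact prefix_agree m "feat" (by decide)
  have h2 : (fun m => pvPrefixA m == some "fix") = (fun m => pvPrefixB m == "fix") := by
    funext m; exact prefix_agree m "fix" (by decide)
  have h3 : pvIsBreaking = fun m => PySem.Str.isIn "BREAKING" m := by
    funext m; rfl
  rw [h1, h2, h3]
  cases hb : l.any (fun m => PySem.Str.isIn "BREAKING" m) <;>
  cases hf : l.any (fun m => pvPrefixB m == "feat") <;>
  cases hx : l.any (fun m => pvPrefixB m == "fix") <;>
  rfl
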